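-- pv_equiv track=rewrite | github.com/MsAurthee/mad_libs | game.py | find_placeholders
-- ===== SOURCE A (Python) =====
-- def find_placeholders(template_text):
--     ph = []
--     start = template_text.find("{")
--     while start != -1:
--         end = template_text.find("}", start+1)
--         if end == -1:
--             break
--         key = template_text[start+1:end].strip()
--         ph.append(key)
--         start = template_text.find("{", end+1)
--     seen = set()
--     result = []
--     for p in ph:
--         if p not in seen:
--             seen.add(p)
--             result.append(p)
--     return result
-- ===== SOURCE B (Python) =====
-- def find_placeholders(template_text):
--     # one-pass character state machine: buf is None outside braces,
--     # a list of collected chars inside; dedup via dict.fromkeys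
--     keys = []
--     buf = None
--     for ch in template_text:
--         if buf is None:
--             if ch == "{":
--                 buf = []
--         elif ch == "}":
--             keys.append("".join(buf).strip())
--             buf = None
--         else:
--             buf.append(ch)
--     return list(dict.fromkeys(keys))
-- ===== Notes on version B (the rewrite author's own statement) =====
-- stated objective: alternative
-- what changed: Replaced the repeated str.find index-jumping while-loop by a single left-to-right character state machine (buffer outside/inside braces) and replaced the seen-set dedup loop by dict.fromkeys.
import Mathlib
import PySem

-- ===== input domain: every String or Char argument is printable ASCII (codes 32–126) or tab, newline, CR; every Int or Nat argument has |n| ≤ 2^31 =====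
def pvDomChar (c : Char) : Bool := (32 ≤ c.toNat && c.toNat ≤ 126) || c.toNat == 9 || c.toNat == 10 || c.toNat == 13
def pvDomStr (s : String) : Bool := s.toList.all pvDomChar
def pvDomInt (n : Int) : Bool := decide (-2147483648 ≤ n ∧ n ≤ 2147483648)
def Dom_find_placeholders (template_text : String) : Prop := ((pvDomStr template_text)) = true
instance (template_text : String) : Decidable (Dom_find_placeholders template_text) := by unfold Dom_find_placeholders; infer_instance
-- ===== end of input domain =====

-- B replaces A's str.find index-jumping loop by a one-pass character state machine
-- and the seen-set dedup loop by dict.fromkeys (alternative structure, same cost).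

-- ===== PORT A =====
-- while-loop of A: `start` is the int from str.find; fuel only makes the loop total
-- (it provably never runs out: start strictly increases and is bounded by the length).
def pvALoop (s : List Char) : Nat → Int → List (List Char)
  | 0, _ => []
  | fuel+1, start =>
    if start = -1 then []
    else
      let e := PySem.Chars.findFrom s ['}'] (start+1) none
      if e = -1 then []
      else
        let key := PySem.Chars.strip (PySem.Chars.slice s (some (start+1)) (some e))
        key :: pvALoop s fuel (PySem.Chars.findFrom s ['{'] (e+1) none)

-- A's dedup loop: seen-set + result list
def pvADedup (l : List String) : List String :=
  (l.foldl
    (fun (acc : PySem.Set String × List String) p =>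
      if PySem.Set.contains acc.1 p then acc else (PySem.Set.add acc.1 p, acc.2 ++ [p]))
    (PySem.Set.empty, [])).2

def find_placeholders (template_text : String) : List String :=
  let s := template_text.toList
  let ph := (pvALoop s (s.length + 1) (PySem.Chars.find s ['{'])).map String.ofList
  pvADedup ph

-- ===== PORT B =====
-- the state machine: `none` = outside braces, `some b` = inside with collected chars b
def pvBScan : List Char → Option (List Char) → List (List Char)
  | [], _ => []
  | c :: rest, none => if c = '{' then pvBScan rest (some []) else pvBScan rest none
  | c :: rest, some b =>
      if c = '}' then PySem.Chars.strip b :: pvBScan rest none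
      else pvBScan rest (some (b ++ [c]))

def find_placeholders_alt (template_text : String) : List String :=
  PySem.List.dedup ((pvBScan template_text.toList none).map String.ofList)

-- ===== PRECONDITION & SPEC =====
def Spec_find_placeholders (template_text : String) (out : List String) : Prop := out = find_placeholders_alt template_text
instance (template_text : String) (out : List String) : Decidable (Spec_find_placeholders template_text out) := by unfold Spec_find_placeholders; infer_instance

-- ===== CLAIM (what is proved, stated in full; the proofs are below) =====
def Claim_equal_find_placeholders : Prop := ∀ (template_text : String), Dom_find_placeholders template_text → Spec_find_placeholders template_text (find_placeholders template_text)

-- ===== LEMMAS AND PROOFS =====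

-- first index of a character, the proof-side yardstick
def pvFirstIdx (cs : List Char) (c : Char) : Option Nat :=
  match cs with
  | [] => none
  | x :: r => if x = c then some 0 else (pvFirstIdx r c).map (· + 1)

theorem pv_singleton_prefix_iff (c : Char) (l : List Char) :
    [c] <+: l ↔ ∃ t, l = c :: t := by
  constructor
  · rintro ⟨t, ht⟩; exact ⟨t, ht.symm⟩
  · rintro ⟨t, rfl⟩; exact ⟨t, rfl⟩

theorem pvFirstIdx_none_of_not_mem {cs : List Char} {c : Char} (h : c ∉ cs) :
    pvFirstIdx cs c = none := by
  induction cs with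
  | nil => rfl
  | cons x r ih =>
    simp only [pvFirstIdx]
    simp only [List.mem_cons, not_or] at h
    rw [if_neg (fun hx => h.1 hx.symm), ih h.2]
    rfl

theorem pvFirstIdx_eq_some {cs : List Char} {c : Char} {j : Nat}
    (h1 : [c] <+: cs.drop j) (h2 : ∀ i, i < j → ¬ [c] <+: cs.drop i) :
    pvFirstIdx cs c = some j := by
  induction cs generalizing j with
  | nil =>
    exfalso
    rcases (pv_singleton_prefix_iff c _).1 h1 with ⟨t, ht⟩
    simp at ht
  | cons x r ih =>
    cases j with
    | zero =>
      rcases (pv_singleton_prefix_iff c _).1 h1 with ⟨t, ht⟩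
      simp at ht
      simp [pvFirstIdx, ht.1]
    | succ i =>
      have hx : x ≠ c := by
        intro hxc
        exact h2 0 (Nat.succ_pos i) ((pv_singleton_prefix_iff c _).2 ⟨r, by simp [hxc]⟩)
      have := ih (j := i) (by simpa using h1)
        (fun i' hi' => by
          have := h2 (i' + 1) (by omega)
          simpa using this)
      simp [pvFirstIdx, hx, this]

-- B-side unrollings
theorem pvBScan_some (cs : List Char) (b : List Char) :
    pvBScan cs (some b) =
      match pvFirstIdx cs '}' with
      | none => []
      | some k => PySem.Chars.strip (b ++ cs.take k) :: pvBScan (cs.drop (k+1)) none := by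
  induction cs generalizing b with
  | nil => rfl
  | cons c r ih =>
    by_cases hc : c = '}'
    · subst hc; simp [pvBScan, pvFirstIdx]
    · simp only [pvBScan, pvFirstIdx, if_neg hc, ih (b ++ [c])]
      cases h : pvFirstIdx r '}' with
      | none => simp
      | some k => simp [List.append_assoc]

theorem pvBScan_none (cs : List Char) :
    pvBScan cs none =
      match pvFirstIdx cs '{' with
      | none => []
      | some k => pvBScan (cs.drop (k+1)) (some []) := by
  induction cs with
  | nil => rfl
  | cons c r ih =>
    by_cases hc : c = '{'
    · subst hc; simp [pvBScan, pvFirstIdx]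
    · simp only [pvBScan, pvFirstIdx, if_neg hc, ih]
      cases h : pvFirstIdx r '{' with
      | none => simp
      | some k => simp

-- main loop equivalence
theorem pvMain (fuel : Nat) (s : List Char) (k : Nat) (hk : k ≤ s.length)
    (hfuel : s.length - k < fuel) :
    pvALoop s fuel (PySem.Chars.findFrom s ['{'] (k : Int) none) = pvBScan (s.drop k) none := by
  induction fuel generalizing k with
  | zero => omega
  | succ f ih =>
    by_cases h1 : PySem.Chars.findFrom s ['{'] (k : Int) none = -1
    · -- no '{' anywhere from k on
      have hnot : ¬ ['{'] <:+: s.drop k :=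
        (PySem.Chars.findFrom_natCast_eq_neg_one_iff s ['{'] k hk).1 h1
      have hmem : '{' ∉ s.drop k := fun hm => by
        rcases List.append_of_mem hm with ⟨u, v, huv⟩
        exact hnot ⟨u, v, by rw [huv]; simp⟩
      rw [h1, pvBScan_none, pvFirstIdx_none_of_not_mem hmem]
      simp [pvALoop]
    · obtain ⟨hle, hpre, hmin⟩ := PySem.Chars.findFrom_natCast_spec s ['{'] k hk h1
      set st := PySem.Chars.findFrom s ['{'] (k : Int) none with hst
      have hst0 : (0:Int) ≤ st := le_trans (by exact_mod_cast Nat.zero_le k) hle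
      set n := st.toNat with hn
      have hstn : st = (n : Int) := by omega
      have hnk : k ≤ n := by omega
      have hnlen : n < s.length := by
        rcases (pv_singleton_prefix_iff _ _).1 hpre with ⟨t, ht⟩
        have : (s.drop n).length ≠ 0 := by rw [ht]; simp
        simp at this; omega
      -- first '{' in s.drop k is at n - k
      have hfi : pvFirstIdx (s.drop k) '{' = some (n - k) := by
        apply pvFirstIdx_eq_some
        · rw [List.drop_drop, show k + (n - k) = n by omega]; exact hpre
        · intro i hi
          rw [List.drop_drop, show k + i = i + k by omega]
          exact hmin (i + k) (by omega) (by omega)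
      rw [pvBScan_none, hfi]
      show pvALoop s (f+1) st = pvBScan ((s.drop k).drop (n - k + 1)) (some [])
      have hdd : (s.drop k).drop (n - k + 1) = s.drop (n+1) := by
        rw [List.drop_drop]; congr 1; omega
      rw [hdd]
      -- A side: unfold one step
      have hstm1 : st ≠ -1 := h1
      show (if st = -1 then [] else _) = _
      rw [if_neg hstm1]
      have hcast : st + 1 = ((n + 1 : Nat) : Int) := by omega
      rw [hcast]
      by_cases h2 : PySem.Chars.findFrom s ['}'] ((n + 1 : Nat) : Int) none = -1
      · -- no '}' after n
        have hnot : ¬ ['}'] <:+: s.drop (n+1) :=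
          (PySem.Chars.findFrom_natCast_eq_neg_one_iff s ['}'] (n+1) (by omega)).1 h2
        have hmem : '}' ∉ s.drop (n+1) := fun hm => by
          rcases List.append_of_mem hm with ⟨u, v, huv⟩
          exact hnot ⟨u, v, by rw [huv]; simp⟩
        rw [pvBScan_some, pvFirstIdx_none_of_not_mem hmem]
        rw [if_pos h2]
      ·
        obtain ⟨hle2, hpre2, hmin2⟩ :=
          PySem.Chars.findFrom_natCast_spec s ['}'] (n+1) (by omega) h2
        set e := PySem.Chars.findFrom s ['}'] ((n+1 : Nat) : Int) none with he
        have he0 : (0:Int) ≤ e := le_trans (by exact_mod_cast Nat.zero_le (n+1)) hle2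
        set m := e.toNat with hm
        have hem : e = (m : Int) := by omega
        have hmn : n + 1 ≤ m := by omega
        have hmlen : m < s.length := by
          rcases (pv_singleton_prefix_iff _ _).1 hpre2 with ⟨t, ht⟩
          have : (s.drop m).length ≠ 0 := by rw [ht]; simp
          simp at this; omega
        have hfi2 : pvFirstIdx (s.drop (n+1)) '}' = some (m - (n+1)) := by
          apply pvFirstIdx_eq_some
          · rw [List.drop_drop, show (n+1) + (m - (n+1)) = m by omega]; exact hpre2
          · intro i hi
            rw [List.drop_drop, show (n+1) + i = i + (n+1) by omega]
            exact hmin2 (i + (n+1)) (by omega) (by omega)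
        rw [pvBScan_some, hfi2]
        rw [if_neg h2]
        show _ :: pvALoop s f (PySem.Chars.findFrom s ['{'] (e+1) none)
            = PySem.Chars.strip ([] ++ (s.drop (n+1)).take (m - (n+1)))
              :: pvBScan ((s.drop (n+1)).drop (m - (n+1) + 1)) none
        have hslice : PySem.Chars.slice s (some ((n + 1 : Nat) : Int)) (some e)
            = [] ++ (s.drop (n+1)).take (m - (n+1)) := by
          rw [hem, PySem.Chars.slice_eq_listSlice, PySem.List.slice_natCast]
          simp
        rw [hslice]
        congr 1
        have hdd2 : (s.drop (n+1)).drop (m - (n+1) + 1) = s.drop (m+1) := by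
          rw [List.drop_drop]; congr 1; omega
        rw [hdd2]
        have hcast2 : e + 1 = ((m + 1 : Nat) : Int) := by omega
        rw [hcast2]
        exact ih (m+1) (by omega) (by omega)

-- A's dedup loop keeps seen = result, so it is dict.fromkeys
theorem pvADedup_diag (l : List String) (acc : List String) :
    l.foldl
      (fun (a : PySem.Set String × List String) p =>
        if PySem.Set.contains a.1 p then a else (PySem.Set.add a.1 p, a.2 ++ [p]))
      (acc, acc)
    = (l.foldl PySem.Set.add acc, l.foldl PySem.Set.add acc) := by
  induction l generalizing acc with
  | nil => rfl
  | cons p r ih =>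
    simp only [List.foldl_cons]
    have hstep :
        (if PySem.Set.contains acc p then (acc, acc) else (PySem.Set.add acc p, acc ++ [p]))
        = ((PySem.Set.add acc p : PySem.Set String), (PySem.Set.add acc p : List String)) := by
      by_cases h : p ∈ acc <;> simp [PySem.Set.add, PySem.Set.contains, h]
    rw [hstep, ih]

theorem pvADedup_eq (l : List String) : pvADedup l = PySem.List.dedup l := by
  unfold pvADedup
  rw [show ((PySem.Set.empty : PySem.Set String), ([] : List String))
        = (([] : PySem.Set String), ([] : List String)) from rfl]
  rw [pvADedup_diag]
  simp [PySem.List.dedup_eq_ofList, PySem.Set.ofList_eq_foldl]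

-- ===== VERDICT (by name: the statement is the Claim_ definition above) =====
theorem find_placeholders_spec : Claim_equal_find_placeholders := by
  intro t _
  unfold Spec_find_placeholders find_placeholders find_placeholders_alt
  rw [pvADedup_eq]
  congr 2
  have h0 : PySem.Chars.find t.toList ['{'] = PySem.Chars.findFrom t.toList ['{'] ((0:Nat) : Int) none := by
    rw [Nat.cast_zero, PySem.Chars.findFrom_zero]
  rw [h0, pvMain (t.toList.length + 1) t.toList 0 (Nat.zero_le _) (by omega)]
  simp
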